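-- pv_equiv track=rewrite | github.com/pixelatedempathy/ai | pixel/clinical/clinical_reasoning_engine.py | _get_missing_criteria
-- ===== SOURCE A (Python) =====
-- from typing import Any, Dict, List
--
-- def _get_missing_criteria(symptoms: List[str], criteria: Dict[str, Any]) -> List[str]:
--     """Get diagnostic criteria not met by current symptoms."""
--     core_symptoms = criteria.get('core_symptoms', [])
--     missing = []
--
--     for core_symptom in core_symptoms:
--         found = False
--         for symptom in symptoms:
--             if any(word in symptom for word in core_symptom.lower().split()):
--                 found = True
--                 break
--         if not found:
--             missing.append(core_symptom)
--
--     return missing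
-- ===== SOURCE B (Python) =====
-- from typing import Any, Dict, List
--
-- def _get_missing_criteria(symptoms: List[str], criteria: Dict[str, Any]) -> List[str]:
--     """Get diagnostic criteria not met by current symptoms."""
--     core_symptoms = criteria.get('core_symptoms', [])
--     combined = ' '.join(symptoms)
--     return [cs for cs in core_symptoms
--             if not any(word in combined for word in cs.lower().split())]
-- ===== Notes on version B (the rewrite author's own statement) =====
-- stated objective: simpler
-- what changed: B joins all symptoms into one space-separated string built once and tests each split word against it with a single comprehension, eliminating A's explicit inner loop over symptoms with its found/break flag; split words contain no whitespace, so no match can cross a join boundary.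
import Mathlib
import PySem

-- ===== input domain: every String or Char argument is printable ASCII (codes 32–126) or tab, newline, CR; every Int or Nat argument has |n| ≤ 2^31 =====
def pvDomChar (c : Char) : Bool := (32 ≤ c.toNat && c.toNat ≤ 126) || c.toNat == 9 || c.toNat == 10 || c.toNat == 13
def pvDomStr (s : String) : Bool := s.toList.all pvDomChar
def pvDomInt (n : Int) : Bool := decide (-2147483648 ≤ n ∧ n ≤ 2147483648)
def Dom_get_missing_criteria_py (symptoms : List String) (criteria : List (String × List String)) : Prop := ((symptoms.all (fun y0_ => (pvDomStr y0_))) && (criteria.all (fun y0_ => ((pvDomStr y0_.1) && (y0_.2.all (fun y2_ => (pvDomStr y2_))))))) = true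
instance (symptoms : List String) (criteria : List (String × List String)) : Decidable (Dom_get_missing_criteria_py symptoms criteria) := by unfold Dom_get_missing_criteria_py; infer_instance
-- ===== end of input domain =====

-- B builds the space-separated join of all symptoms once and scans each split word against it,
-- replacing A's explicit inner loop over symptoms (with its found/break flag); objective: simpler.


-- ===== PORT A =====
-- the inner 'for symptom in symptoms: … break' loop with its found flag
def aFindLoop (core_symptom : String) : List String → Bool
  | [] => false
  | symptom :: rest =>
    if (PySem.Str.split₀ (PySem.Str.lower core_symptom)).any
        (fun word => PySem.Str.isIn word symptom) then true
    else aFindLoop core_symptom rest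

def get_missing_criteria_py (symptoms : List String) (criteria : List (String × List String)) : List String :=
  let core_symptoms := PySem.Dict.getD ⟨criteria⟩ "core_symptoms" []
  core_symptoms.foldl
    (fun missing core_symptom =>
      let found := aFindLoop core_symptom symptoms
      if !found then missing ++ [core_symptom] else missing) []

-- ===== PORT B =====
def get_missing_criteria_py_alt (symptoms : List String) (criteria : List (String × List String)) : List String :=
  let core_symptoms := PySem.Dict.getD ⟨criteria⟩ "core_symptoms" []
  let combined := PySem.Str.join " " symptoms
  core_symptoms.filter
    (fun cs => !((PySem.Str.split₀ (PySem.Str.lower cs)).any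
        (fun word => PySem.Str.isIn word combined)))

-- ===== PRECONDITION & SPEC =====
def Spec_get_missing_criteria_py (symptoms : List String) (criteria : List (String × List String)) (out : List String) : Prop := out = get_missing_criteria_py_alt symptoms criteria
instance (symptoms : List String) (criteria : List (String × List String)) (out : List String) : Decidable (Spec_get_missing_criteria_py symptoms criteria out) := by unfold Spec_get_missing_criteria_py; infer_instance

-- ===== CLAIM (what is proved, stated in full; the proofs are below) =====
def Claim_equal_get_missing_criteria_py : Prop := ∀ (symptoms : List String) (criteria : List (String × List String)), Dom_get_missing_criteria_py symptoms criteria → Spec_get_missing_criteria_py symptoms criteria (get_missing_criteria_py symptoms criteria)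

-- ===== LEMMAS AND PROOFS =====

-- a word may not straddle the separator it cannot contain
theorem infix_append_cons {w a b : List Char} {c : Char} (hc : c ∉ w) :
    w <:+: (a ++ c :: b) ↔ w <:+: a ∨ w <:+: b := by
  constructor
  · rintro ⟨p, t, h⟩
    rw [List.append_assoc] at h
    rcases List.append_eq_append_iff.mp h with ⟨as, ha, hwt⟩ | ⟨bs, hp, hcb⟩
    · rcases List.append_eq_append_iff.mp hwt with ⟨xs, has, ht⟩ | ⟨ys, hw, hcb⟩
      · exact Or.inl ⟨p, xs, by rw [ha, has, List.append_assoc]⟩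
      · cases ys with
        | nil => exact Or.inl ⟨p, [], by simp [hw, ha]⟩
        | cons y ys' =>
          exfalso
          simp only [List.cons_append] at hcb
          obtain ⟨hy, -⟩ := List.cons_eq_cons.mp hcb
          exact hc (by rw [hw, hy]; simp)
    · cases bs with
      | nil =>
        simp only [List.nil_append] at hcb
        cases w with
        | nil => exact Or.inl List.nil_infix
        | cons wh wt =>
          exfalso
          simp only [List.cons_append] at hcb
          obtain ⟨hy, -⟩ := List.cons_eq_cons.mp hcb
          exact hc (by rw [hy]; simp)
      | cons b0 bs' =>
        simp only [List.cons_append] at hcb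
        obtain ⟨-, hb⟩ := List.cons_eq_cons.mp hcb
        exact Or.inr ⟨bs', t, by rw [hb, List.append_assoc]⟩
  · rintro (h | h)
    · exact h.trans ⟨[], c :: b, by simp⟩
    · exact h.trans ⟨a ++ [c], [], by simp⟩

-- every word split() produces is nonempty and whitespace-free
theorem split0_go_sound (s : List Char) : ∀ cur acc,
    (∀ w ∈ acc, w ≠ [] ∧ ∀ c ∈ w, PySem.Chars.isspace c = false) →
    (∀ ch ∈ cur, PySem.Chars.isspace ch = false) →
    ∀ w ∈ PySem.Chars.split₀.go s cur acc, w ≠ [] ∧ ∀ c ∈ w, PySem.Chars.isspace c = false := by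
  induction s with
  | nil =>
    intro cur acc hacc hcur w hw
    rw [PySem.Chars.split₀.go] at hw
    split_ifs at hw with h
    · exact hacc w (List.mem_reverse.mp hw)
    · rcases List.mem_cons.mp (List.mem_reverse.mp hw) with rfl | h'
      · exact ⟨by simp only [ne_eq, List.reverse_eq_nil_iff]; simpa [List.isEmpty_iff] using h,
          fun d hd => hcur d (List.mem_reverse.mp hd)⟩
      · exact hacc w h'
  | cons c rest ih =>
    intro cur acc hacc hcur w hw
    rw [PySem.Chars.split₀.go] at hw
    split_ifs at hw with h1 h2
    · exact ih [] acc hacc (by simp) w hw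
    · refine ih [] (cur.reverse :: acc) ?_ (by simp) w hw
      intro v hv
      rcases List.mem_cons.mp hv with rfl | hv'
      · exact ⟨by simp only [ne_eq, List.reverse_eq_nil_iff]; simpa [List.isEmpty_iff] using h2,
          fun d hd => hcur d (List.mem_reverse.mp hd)⟩
      · exact hacc v hv'
    · refine ih (c :: cur) acc hacc ?_ w hw
      intro d hd
      rcases List.mem_cons.mp hd with rfl | hd'
      · simpa using h1
      · exact hcur d hd'

theorem split0_sound (cs : List Char) (w : List Char) (hw : w ∈ PySem.Chars.split₀ cs) :
    w ≠ [] ∧ ∀ c ∈ w, PySem.Chars.isspace c = false := by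
  exact split0_go_sound cs [] [] (by simp) (by simp) w hw

-- a nonempty space-free word is in the space-join iff it is in one of the parts
theorem isIn_join (w : List Char) (hw : w ≠ []) (hsp : ' ' ∉ w) :
    ∀ symptoms : List String,
    PySem.Chars.isIn w (PySem.Chars.join [' '] (symptoms.map String.toList)) =
      symptoms.any (fun s => PySem.Chars.isIn w s.toList) := by
  intro symptoms
  induction symptoms with
  | nil =>
    have hj : PySem.Chars.join [' '] (List.map String.toList ([] : List String)) = [] := by decide
    rw [Bool.eq_iff_iff, PySem.Chars.isIn_iff_infix, hj]
    simp [List.infix_nil, hw]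
  | cons s rest ih =>
    cases rest with
    | nil =>
      rw [Bool.eq_iff_iff]
      simp [PySem.Chars.join_singleton, PySem.Chars.isIn_iff_infix]
    | cons s' rest' =>
      rw [Bool.eq_iff_iff, List.map_cons, List.map_cons, PySem.Chars.join_cons_cons,
        List.append_assoc, List.singleton_append, PySem.Chars.isIn_iff_infix,
        infix_append_cons hsp]
      simp only [List.map_cons] at ih
      simp only [← PySem.Chars.isIn_iff_infix, ih, List.any_cons, Bool.or_eq_true,
        List.any_eq_true]

-- per core symptom: A's inner loop agrees with B's single scan of the join
theorem found_eq (symptoms : List String) (cs : String) :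
    aFindLoop cs symptoms =
      (PySem.Str.split₀ (PySem.Str.lower cs)).any
        (fun word => PySem.Str.isIn word (PySem.Str.join " " symptoms)) := by
  rw [show ∀ l : List String, aFindLoop cs l =
      l.any (fun s => (PySem.Str.split₀ (PySem.Str.lower cs)).any
        (fun word => PySem.Str.isIn word s)) from ?_]
  · rw [Bool.eq_iff_iff]
    simp only [List.any_eq_true]
    constructor
    · rintro ⟨s, hs, word, hword, h⟩
      refine ⟨word, hword, ?_⟩
      have hmem : word.toList ∈ PySem.Chars.split₀ (PySem.Str.lower cs).toList := by
        rw [← PySem.Str.split₀_map_toList]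
        exact List.mem_map_of_mem hword
      obtain ⟨hne, hfree⟩ := split0_sound _ _ hmem
      have hsp : ' ' ∉ word.toList := fun hx => absurd (hfree ' ' hx) (by decide)
      rw [PySem.Str.isIn_eq, PySem.Str.toList_join,
        show (" " : String).toList = [' '] from rfl, isIn_join word.toList hne hsp,
        List.any_eq_true]
      exact ⟨s, hs, by rw [← PySem.Str.isIn_eq]; exact h⟩
    · rintro ⟨word, hword, h⟩
      have hmem : word.toList ∈ PySem.Chars.split₀ (PySem.Str.lower cs).toList := by
        rw [← PySem.Str.split₀_map_toList]
        exact List.mem_map_of_mem hword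
      obtain ⟨hne, hfree⟩ := split0_sound _ _ hmem
      have hsp : ' ' ∉ word.toList := fun hx => absurd (hfree ' ' hx) (by decide)
      rw [PySem.Str.isIn_eq, PySem.Str.toList_join,
        show (" " : String).toList = [' '] from rfl, isIn_join word.toList hne hsp,
        List.any_eq_true] at h
      obtain ⟨s, hs, h⟩ := h
      exact ⟨s, hs, word, hword, by rw [PySem.Str.isIn_eq]; exact h⟩
  · intro l
    induction l with
    | nil => rfl
    | cons s rest ih =>
      cases h : (PySem.Str.split₀ (PySem.Str.lower cs)).any
          (fun word => PySem.Str.isIn word s) with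
      | false => rw [aFindLoop, if_neg (by rw [h]; decide), ih, List.any_cons, h, Bool.false_or]
      | true => rw [aFindLoop, if_pos h, List.any_cons, h, Bool.true_or]

-- the append-fold with a boolean test is a filter
theorem foldl_filter (p : String → Bool) (l : List String) :
    ∀ acc, l.foldl (fun missing x => if !(p x) then missing ++ [x] else missing) acc =
      acc ++ l.filter (fun x => !(p x)) := by
  induction l with
  | nil => simp
  | cons x rest ih =>
    intro acc
    simp only [List.foldl_cons, List.filter_cons]
    cases h : p x
    · simp only [Bool.not_false, if_true]
      rw [ih (acc ++ [x]), List.append_assoc, List.singleton_append]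
    · simp only [Bool.not_true, Bool.false_eq_true, if_false]
      exact ih acc

-- ===== VERDICT (by name: the statement is the Claim_ definition above) =====
theorem get_missing_criteria_py_spec : Claim_equal_get_missing_criteria_py := by
  intro symptoms criteria _
  unfold Spec_get_missing_criteria_py get_missing_criteria_py get_missing_criteria_py_alt
  rw [PySem.List.foldl_congr_mem _ _
      (fun missing cs => if !((PySem.Str.split₀ (PySem.Str.lower cs)).any
        (fun word => PySem.Str.isIn word (PySem.Str.join " " symptoms))) then missing ++ [cs] else missing) _
      (fun acc cs _ => by rw [found_eq])]
  rw [foldl_filter]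
  simp
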